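-- pv_equiv track=rewrite | github.com/Deepidia/deepidia-rag-app | rag/agent_topic_generator/main.py | _clean_generated_ideas
-- ===== SOURCE A (Python) =====
-- def _clean_generated_ideas(ideas, num_ideas):
--     """
--     Cleans and formats the generated ideas into a structured list.
--     """
--     structured_ideas = []
--     current_idea = {}
--
--     for line in ideas:
--         line = line.strip()
--         if not line:
--             if current_idea:
--                 structured_ideas.append(current_idea)
--                 current_idea = {}
--             continue
--
--         if line.startswith('title:'):
--             current_idea['title'] = line[6:].strip()
--         elif line.startswith('description:'):
--             current_idea['description'] = line[12:].strip()
--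
--     # Add the last idea if exists
--     if current_idea:
--         structured_ideas.append(current_idea)
--
--     return structured_ideas[:num_ideas]
-- ===== SOURCE B (Python) =====
-- def _clean_generated_ideas(ideas, num_ideas):
--     # Two-phase: split stripped lines into blank-separated segments, then
--     # fold each segment into an idea dict; keep non-empty dicts, slice.
--     stripped = [line.strip() for line in ideas]
--     segments = []
--     cur = []
--     for line in stripped:
--         if line:
--             cur.append(line)
--         elif cur:
--             segments.append(cur)
--             cur = []
--     if cur:
--         segments.append(cur)
--
--     result = []
--     for seg in segments:
--         idea = {}
--         for line in seg:
--             if line.startswith('title:'):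
--                 idea['title'] = line[6:].strip()
--             elif line.startswith('description:'):
--                 idea['description'] = line[12:].strip()
--         if idea:
--             result.append(idea)
--     return result[:num_ideas]
-- ===== Notes on version B (the rewrite author's own statement) =====
-- stated objective: alternative
-- what changed: Replaces A's single interleaved pass carrying a mutable current dict with a two-phase decomposition: first group the stripped lines into blank-separated segments, then fold each segment independently into a dict, filter out empty dicts, and slice.
import Mathlib
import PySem

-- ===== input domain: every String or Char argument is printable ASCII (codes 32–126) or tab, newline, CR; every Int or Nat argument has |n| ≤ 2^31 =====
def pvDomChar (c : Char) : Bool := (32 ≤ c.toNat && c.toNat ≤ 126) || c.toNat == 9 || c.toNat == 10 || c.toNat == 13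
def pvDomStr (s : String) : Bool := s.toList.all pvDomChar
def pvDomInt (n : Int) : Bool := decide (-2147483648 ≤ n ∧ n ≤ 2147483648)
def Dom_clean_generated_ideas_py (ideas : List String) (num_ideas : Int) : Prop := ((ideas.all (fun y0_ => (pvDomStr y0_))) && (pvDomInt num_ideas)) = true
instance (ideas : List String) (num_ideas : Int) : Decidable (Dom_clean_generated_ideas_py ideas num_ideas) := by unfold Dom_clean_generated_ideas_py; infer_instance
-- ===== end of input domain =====

-- B replaces A's single interleaved pass (mutable current dict) with a two-phase
-- decomposition: group stripped lines into blank-separated segments, then fold each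
-- segment into a dict, keep the non-empty ones, slice. Same cost; proved equal.


-- ===== PORT A =====
-- A's loop: walk the raw lines carrying (structured_ideas, current_idea); a blank
-- stripped line flushes a non-empty current dict; 'title:'/'description:' lines
-- overwrite keys in current_idea; final flush; then [:num_ideas].
def pvAGo (lines : List String) (acc : List (PySem.Dict String String))
    (cur : PySem.Dict String String) : List (PySem.Dict String String) :=
  match lines with
  | [] => if cur.items = [] then acc else acc ++ [cur]
  | l :: rest =>
    let s := PySem.Str.strip l
    if s = "" then
      if cur.items = [] then pvAGo rest acc cur
      else pvAGo rest (acc ++ [cur]) PySem.Dict.empty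
    else if PySem.Str.startswith s "title:" then
      pvAGo rest acc (cur.insert "title" (PySem.Str.strip (PySem.Str.slice s (some 6) none)))
    else if PySem.Str.startswith s "description:" then
      pvAGo rest acc (cur.insert "description" (PySem.Str.strip (PySem.Str.slice s (some 12) none)))
    else pvAGo rest acc cur

def clean_generated_ideas_py (ideas : List String) (num_ideas : Int) : List (List (String × String)) :=
  PySem.List.slice ((pvAGo ideas [] PySem.Dict.empty).map (fun d => d.items)) none (some num_ideas)

-- ===== PORT B =====
-- phase 1: group the (already stripped) lines into blank-separated segments
def pvSegGo (lines : List String) (cur : List String) : List (List String) :=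
  match lines with
  | [] => if cur = [] then [] else [cur]
  | l :: rest =>
    if l ≠ "" then pvSegGo rest (cur ++ [l])
    else if cur ≠ [] then cur :: pvSegGo rest []
    else pvSegGo rest []

-- phase 2: fold one segment into an idea dict
def pvIdeaStep (d : PySem.Dict String String) (line : String) : PySem.Dict String String :=
  if PySem.Str.startswith line "title:" then
    d.insert "title" (PySem.Str.strip (PySem.Str.slice line (some 6) none))
  else if PySem.Str.startswith line "description:" then
    d.insert "description" (PySem.Str.strip (PySem.Str.slice line (some 12) none))
  else d

def pvIdeaOf (seg : List String) : PySem.Dict String String :=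
  seg.foldl pvIdeaStep PySem.Dict.empty

def clean_generated_ideas_py_alt (ideas : List String) (num_ideas : Int) : List (List (String × String)) :=
  let segs := pvSegGo (ideas.map PySem.Str.strip) []
  PySem.List.slice
    ((((segs.map pvIdeaOf).filter (fun d => d.items ≠ [])).map (fun d => d.items)))
    none (some num_ideas)

-- ===== PRECONDITION & SPEC =====
def Spec_clean_generated_ideas_py (ideas : List String) (num_ideas : Int) (out : List (List (String × String))) : Prop := out = clean_generated_ideas_py_alt ideas num_ideas
instance (ideas : List String) (num_ideas : Int) (out : List (List (String × String))) : Decidable (Spec_clean_generated_ideas_py ideas num_ideas out) := by unfold Spec_clean_generated_ideas_py; infer_instance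

-- ===== CLAIM (what is proved, stated in full; the proofs are below) =====
def Claim_equal_clean_generated_ideas_py : Prop := ∀ (ideas : List String) (num_ideas : Int), Dom_clean_generated_ideas_py ideas num_ideas → Spec_clean_generated_ideas_py ideas num_ideas (clean_generated_ideas_py ideas num_ideas)

-- ===== LEMMAS AND PROOFS =====

lemma pvIdeaOf_append (seg : List String) (s : String) :
    pvIdeaOf (seg ++ [s]) = pvIdeaStep (pvIdeaOf seg) s := by
  simp [pvIdeaOf, List.foldl_append]

lemma pvDict_items_nil_eq_empty (d : PySem.Dict String String) (h : d.items = []) :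
    d = PySem.Dict.empty := by
  apply PySem.Dict.ext; simpa [PySem.Dict.empty] using h

lemma pvIdeaOf_nil : pvIdeaOf [] = PySem.Dict.empty := rfl

-- the loop invariant: A's interleaved loop with current dict pvIdeaOf curSeg equals
-- acc followed by B's filtered per-segment dicts (with curSeg the open segment)
lemma pvMain (lines : List String) :
    ∀ (acc : List (PySem.Dict String String)) (curSeg : List String),
      pvAGo lines acc (pvIdeaOf curSeg)
        = acc ++ ((pvSegGo (lines.map PySem.Str.strip) curSeg).map pvIdeaOf).filter
            (fun d => d.items ≠ []) := by
  induction lines with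
  | nil =>
    intro acc curSeg
    by_cases hc : curSeg = []
    · simp [pvAGo, pvSegGo, hc, pvIdeaOf, PySem.Dict.empty]
    · by_cases hi : (pvIdeaOf curSeg).items = [] <;>
        simp [pvAGo, pvSegGo, hc, hi, List.filter]
  | cons l rest ih =>
    intro acc curSeg
    by_cases hs : PySem.Str.strip l = ""
    · by_cases hi : (pvIdeaOf curSeg).items = []
      · have he : pvIdeaOf curSeg = pvIdeaOf [] := by
          rw [pvIdeaOf_nil]; exact pvDict_items_nil_eq_empty _ hi
        have h1 : pvAGo (l :: rest) acc (pvIdeaOf curSeg)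
            = pvAGo rest acc (pvIdeaOf []) := by
          rw [he]; simp [pvAGo, hs, pvIdeaOf, PySem.Dict.empty]
        rw [h1, ih acc []]
        congr 1
        by_cases hc : curSeg = []
        · simp only [List.map_cons, hs]
          rw [show pvSegGo ("" :: rest.map PySem.Str.strip) curSeg
                = pvSegGo (rest.map PySem.Str.strip) [] by simp [pvSegGo, hc]]
        · simp only [List.map_cons, hs]
          rw [show pvSegGo ("" :: rest.map PySem.Str.strip) curSeg
                = curSeg :: pvSegGo (rest.map PySem.Str.strip) [] by simp [pvSegGo, hc]]
          simp [hi]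
      · have hc : curSeg ≠ [] := by
          intro h; rw [h] at hi; exact hi rfl
        have h1 : pvAGo (l :: rest) acc (pvIdeaOf curSeg)
            = pvAGo rest (acc ++ [pvIdeaOf curSeg]) (pvIdeaOf []) := by
          simp [pvAGo, hs, hi, pvIdeaOf_nil]
        rw [h1, ih (acc ++ [pvIdeaOf curSeg]) []]
        simp only [List.map_cons, hs]
        rw [show pvSegGo ("" :: rest.map PySem.Str.strip) curSeg
              = curSeg :: pvSegGo (rest.map PySem.Str.strip) [] by simp [pvSegGo, hc]]
        simp [hi]
    · have h1 : pvAGo (l :: rest) acc (pvIdeaOf curSeg)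
          = pvAGo rest acc (pvIdeaStep (pvIdeaOf curSeg) (PySem.Str.strip l)) := by
        simp only [pvAGo, pvIdeaStep, hs, ite_false]
        split_ifs <;> rfl
      rw [h1, ← pvIdeaOf_append, ih acc (curSeg ++ [PySem.Str.strip l])]
      simp only [List.map_cons]
      rw [show pvSegGo (PySem.Str.strip l :: rest.map PySem.Str.strip) curSeg
            = pvSegGo (rest.map PySem.Str.strip) (curSeg ++ [PySem.Str.strip l]) by
          simp [pvSegGo, hs]]

-- ===== VERDICT (by name: the statement is the Claim_ definition above) =====
theorem clean_generated_ideas_py_spec : Claim_equal_clean_generated_ideas_py := by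
  intro ideas num_ideas _
  unfold Spec_clean_generated_ideas_py clean_generated_ideas_py clean_generated_ideas_py_alt
  rw [← pvIdeaOf_nil, pvMain ideas [] []]
  simp
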